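-- pv_equiv track=rewrite | github.com/uumair327/swiggy-rag-system | core/text_chunker.py | _extend_to_sentence_boundary
-- ===== SOURCE A (Python) =====
-- def _extend_to_sentence_boundary(
--     text: str, start_pos: int, end_pos: int, max_extension: int
-- ) -> str:
--     """
--     Extend chunk to the next sentence boundary.
--
--     Args:
--         text: Full text
--         start_pos: Start position of chunk
--         end_pos: Current end position
--         max_extension: Maximum allowed chunk size
--
--     Returns:
--         Extended chunk text
--     """
--     search_limit = min(start_pos + max_extension, len(text))
--
--     # Look for sentence boundaries (period, newline, exclamation, question mark)
--     sentence_endings = [".", "\n", "!", "?"]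
--
--     best_boundary = end_pos
--     for pos in range(end_pos, search_limit):
--         if text[pos] in sentence_endings:
--             # Include the punctuation and any following whitespace
--             best_boundary = pos + 1
--             while best_boundary < search_limit and text[best_boundary] in " \t":
--                 best_boundary += 1
--             break
--
--     return text[start_pos:best_boundary]
-- ===== SOURCE B (Python) =====
-- def _extend_to_sentence_boundary(
--     text: str, start_pos: int, end_pos: int, max_extension: int
-- ) -> str:
--     """Extend chunk to the next sentence boundary (slice/find based)."""
--     search_limit = min(start_pos + max_extension, len(text))
--     best_boundary = end_pos
--     if end_pos < search_limit:
--         window = text[end_pos:search_limit]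
--         hits = [h for h in (window.find(c) for c in ".\n!?") if h != -1]
--         if hits:
--             after = end_pos + min(hits) + 1
--             tail = text[after:search_limit]
--             best_boundary = after + (len(tail) - len(tail.lstrip(" \t")))
--     return text[start_pos:best_boundary]
-- ===== Notes on version B (the rewrite author's own statement) =====
-- stated objective: idiomatic
-- what changed: A's index-by-index forward scan with a nested whitespace while-loop is replaced by slicing the search window once, taking the minimum of the four single-character str.find results, and measuring the whitespace run with lstrip on the tail slice (C-level string primitives instead of an interpreted per-character loop).
-- outside the precondition, e.g. on _extend_to_sentence_boundary('b ?!\ta\ta', 0, -3, 11): A returns 'b ?', B returns 'b ?!\t'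
import Mathlib
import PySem

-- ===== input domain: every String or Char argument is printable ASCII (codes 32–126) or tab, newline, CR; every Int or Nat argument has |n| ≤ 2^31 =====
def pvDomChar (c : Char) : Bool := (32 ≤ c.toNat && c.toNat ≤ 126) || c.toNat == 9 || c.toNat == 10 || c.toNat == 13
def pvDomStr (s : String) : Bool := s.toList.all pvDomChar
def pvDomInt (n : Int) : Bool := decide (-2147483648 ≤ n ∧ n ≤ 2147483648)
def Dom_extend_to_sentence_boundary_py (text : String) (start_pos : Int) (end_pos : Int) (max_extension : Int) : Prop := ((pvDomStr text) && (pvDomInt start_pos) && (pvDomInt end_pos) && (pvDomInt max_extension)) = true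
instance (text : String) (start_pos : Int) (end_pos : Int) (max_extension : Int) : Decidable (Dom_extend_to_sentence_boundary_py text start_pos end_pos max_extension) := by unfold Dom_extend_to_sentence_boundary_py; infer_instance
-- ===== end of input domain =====

-- B replaces A's index-by-index forward scan with its nested whitespace while-loop by slicing the
-- search window once, taking the minimum of the four single-character find results, and measuring
-- the whitespace run on the tail slice (objective: idiomatic; same return value on Pre_).

-- ===== PORT A =====
-- while best_boundary < search_limit and text[best_boundary] in " \t": best_boundary += 1
def pvAWhile (cs : List Char) (limit : Int) (b : Int) : Nat → Int
  | 0 => b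
  | n + 1 =>
    if b < limit then
      match PySem.List.pyGet? cs b with
      | some c => if ([' ', '\t'] : List Char).contains c then pvAWhile cs limit (b + 1) n else b
      | none => b
    else b

-- for pos in range(end_pos, search_limit): if text[pos] in sentence_endings: … break
def pvAScan (cs : List Char) (limit : Int) : Int → Nat → Int → Int
  | _pos, 0, best => best
  | pos, n + 1, best =>
    match PySem.List.pyGet? cs pos with
    | some c =>
      if (['.', '\n', '!', '?'] : List Char).contains c then
        pvAWhile cs limit (pos + 1) ((limit - (pos + 1)).toNat)
      else pvAScan cs limit (pos + 1) n best
    | none => best   -- IndexError in Python (reachable only for negative end_pos, outside Pre_)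

def extend_to_sentence_boundary_py (text : String) (start_pos : Int) (end_pos : Int) (max_extension : Int) : String :=
  let cs := text.toList
  let search_limit := min (start_pos + max_extension) ((cs.length : Int))
  let best_boundary := pvAScan cs search_limit end_pos ((search_limit - end_pos).toNat) end_pos
  PySem.Str.slice text (some start_pos) (some best_boundary)

-- ===== PORT B =====
def extend_to_sentence_boundary_py_alt (text : String) (start_pos : Int) (end_pos : Int) (max_extension : Int) : String :=
  let cs := text.toList
  let search_limit := min (start_pos + max_extension) ((cs.length : Int))
  let best_boundary :=
    if end_pos < search_limit then
      let window := PySem.Chars.slice cs (some end_pos) (some search_limit)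
      let hits := ((['.', '\n', '!', '?'] : List Char).map
          (fun c => PySem.Chars.find window [c])).filter (fun h => !(h == -1))
      match PySem.List.min? hits (fun x => x) with
      | some m =>
        let after := end_pos + m + 1
        let tail := PySem.Chars.slice cs (some after) (some search_limit)
        -- tail.lstrip(" \t") ported by hand as dropWhile over ' '/'\t' (exact: single ASCII chars)
        after + ((tail.length : Int) - ((tail.dropWhile ([' ', '\t'] : List Char).contains).length : Int))
      | none => end_pos
    else end_pos
  PySem.Str.slice text (some start_pos) (some best_boundary)

-- ===== PRECONDITION & SPEC =====
-- Pre_ excludes only the inputs where A's scan loop actually starts at a negative end_pos (outside the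
-- chunker's natural domain of nonnegative offsets): there A raises IndexError (end_pos < -len(text)) or
-- scans from Python's negative-index wraparound — a corner no caller specifies, where B's slice-based
-- reading legitimately differs.
def Pre_extend_to_sentence_boundary_py (text : String) (start_pos : Int) (end_pos : Int) (max_extension : Int) : Prop :=
  0 ≤ end_pos ∨ min (start_pos + max_extension) ((text.toList.length : Int)) ≤ end_pos
instance (text : String) (start_pos : Int) (end_pos : Int) (max_extension : Int) : Decidable (Pre_extend_to_sentence_boundary_py text start_pos end_pos max_extension) := by unfold Pre_extend_to_sentence_boundary_py; infer_instance
def pvWitness_extend_to_sentence_boundary_py : String × Int × Int × Int := ("Hi. Go!", 0, 2, 7)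

def Spec_extend_to_sentence_boundary_py (text : String) (start_pos : Int) (end_pos : Int) (max_extension : Int) (out : String) : Prop := out = extend_to_sentence_boundary_py_alt text start_pos end_pos max_extension
instance (text : String) (start_pos : Int) (end_pos : Int) (max_extension : Int) (out : String) : Decidable (Spec_extend_to_sentence_boundary_py text start_pos end_pos max_extension out) := by unfold Spec_extend_to_sentence_boundary_py; infer_instance

-- ===== CLAIM (what is proved, stated in full; the proofs are below) =====
def Claim_equal_extend_to_sentence_boundary_py : Prop := ∀ (text : String) (start_pos : Int) (end_pos : Int) (max_extension : Int), Dom_extend_to_sentence_boundary_py text start_pos end_pos max_extension → Pre_extend_to_sentence_boundary_py text start_pos end_pos max_extension → Spec_extend_to_sentence_boundary_py text start_pos end_pos max_extension (extend_to_sentence_boundary_py text start_pos end_pos max_extension)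

-- ===== LEMMAS AND PROOFS =====

lemma pv_chars_slice_eq (cs : List Char) (a b : Option Int) :
    PySem.Chars.slice cs a b = PySem.List.slice cs a b := rfl

-- one cons-step of a slice with in-range bounds
lemma pv_slice_cons (cs : List Char) {p l : Int} (h0 : 0 ≤ p) (hpl : p < l) (hl : l ≤ (cs.length : Int)) :
    PySem.Chars.slice cs (some p) (some l) =
      cs[p.toNat]'(by omega) :: PySem.Chars.slice cs (some (p + 1)) (some l) := by
  simp only [pv_chars_slice_eq]
  rw [PySem.List.slice_toNat cs h0 (by omega : (0:Int) ≤ l),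
      PySem.List.slice_toNat cs (by omega : (0:Int) ≤ p + 1) (by omega : (0:Int) ≤ l)]
  rw [List.drop_eq_getElem_cons (i := p.toNat) (by omega)]
  have h1 : (p + 1).toNat = p.toNat + 1 := by omega
  have h2 : l.toNat - p.toNat = (l.toNat - (p.toNat + 1)) + 1 := by omega
  rw [h1, h2, List.take_succ_cons]

lemma pv_slice_empty (cs : List Char) {p l : Int} (h0 : 0 ≤ p) (h0l : 0 ≤ l) (hlp : l ≤ p) :
    PySem.Chars.slice cs (some p) (some l) = ([] : List Char) := by
  simp only [pv_chars_slice_eq]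
  rw [PySem.List.slice_toNat cs h0 h0l]
  have : l.toNat - p.toNat = 0 := by omega
  rw [this, List.take_zero]

-- A's whitespace while-loop measured as a takeWhile over the remaining slice
lemma pv_while_eq (cs : List Char) {l : Int} (h0l : 0 ≤ l) (hl : l ≤ (cs.length : Int)) :
    ∀ (n : Nat) (b : Int), 0 ≤ b → n = (l - b).toNat →
      pvAWhile cs l b n =
        b + (((PySem.Chars.slice cs (some b) (some l)).takeWhile
              ([' ', '\t'] : List Char).contains).length : Int) := by
  intro n
  induction n with
  | zero =>
    intro b hb hn
    rw [pv_slice_empty cs hb h0l (by omega)]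
    simp [pvAWhile]
  | succ n ih =>
    intro b hb hn
    have hbl : b < l := by omega
    rw [pv_slice_cons cs hb hbl hl]
    show (if b < l then _ else _) = _
    rw [if_pos hbl, PySem.List.pyGet?_eq_some_getElem cs hb (by omega)]
    dsimp only
    by_cases hc : ([' ', '\t'] : List Char).contains (cs[b.toNat]'(by omega)) = true
    · rw [if_pos hc, List.takeWhile_cons_of_pos hc]
      rw [ih (b + 1) (by omega) (by omega)]
      simp only [List.length_cons]
      push_cast; omega
    · rw [if_neg hc, List.takeWhile_cons_of_neg hc]
      simp

-- A's scan characterised by findIdx? on the window slice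
lemma pv_scan_eq (cs : List Char) {l : Int} (h0l : 0 ≤ l) (hl : l ≤ (cs.length : Int)) :
    ∀ (n : Nat) (pos best : Int), 0 ≤ pos → n = (l - pos).toNat →
      pvAScan cs l pos n best =
        match (PySem.Chars.slice cs (some pos) (some l)).findIdx?
            (['.', '\n', '!', '?'] : List Char).contains with
        | none => best
        | some i =>
          (pos + (i : Int) + 1) +
            (((PySem.Chars.slice cs (some (pos + (i : Int) + 1)) (some l)).takeWhile
                ([' ', '\t'] : List Char).contains).length : Int) := by
  intro n
  induction n with
  | zero =>
    intro pos best hp hn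
    rw [pv_slice_empty cs hp h0l (by omega)]
    simp [pvAScan]
  | succ n ih =>
    intro pos best hp hn
    have hpl : pos < l := by omega
    rw [pv_slice_cons cs hp hpl hl]
    show (match PySem.List.pyGet? cs pos with
          | some c => if (['.', '\n', '!', '?'] : List Char).contains c then
              pvAWhile cs l (pos + 1) ((l - (pos + 1)).toNat)
            else pvAScan cs l (pos + 1) n best
          | none => best) = _
    rw [PySem.List.pyGet?_eq_some_getElem cs hp (by omega), List.findIdx?_cons]
    dsimp only
    by_cases hc : (['.', '\n', '!', '?'] : List Char).contains (cs[pos.toNat]'(by omega)) = true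
    · rw [if_pos hc, if_pos hc]
      rw [pv_while_eq cs h0l hl ((l - (pos + 1)).toNat) (pos + 1) (by omega) rfl]
      norm_num
    · rw [if_neg hc, if_neg hc]
      rw [ih (pos + 1) best (by omega) (by omega)]
      rcases hf : (PySem.Chars.slice cs (some (pos + 1)) (some l)).findIdx?
          (['.', '\n', '!', '?'] : List Char).contains with _ | i
      · simp only [Option.map_none]
      · simp only [Option.map_some]
        have harg : pos + 1 + (i : Int) + 1 = pos + (((i:Nat) + 1 : Nat) : Int) + 1 := by push_cast; ring
        rw [harg]

lemma pv_single_prefix (w : List Char) (c : Char) (j : Nat) :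
    [c] <+: w.drop j ↔ w[j]? = some c := by
  rw [← List.head?_drop]
  rcases hd : w.drop j with _ | ⟨a, t⟩ <;> simp [List.prefix_cons_iff, eq_comm]

lemma pv_single_infix (w : List Char) (c : Char) : [c] <:+: w ↔ c ∈ w := by
  constructor
  · intro h; exact h.sublist.subset (by simp)
  · intro h
    obtain ⟨s, t, rfl⟩ := List.append_of_mem h
    exact ⟨s, t, by simp⟩

-- first-occurrence characterisation of a single-character find
lemma pv_find_char_eq (w : List Char) (c : Char) (h : 0 ≤ PySem.Chars.find w [c]) :
    ∃ k : Nat, PySem.Chars.find w [c] = (k : Int) ∧ (∃ hk : k < w.length, w[k] = c) ∧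
      ∀ j < k, ∀ (hj : j < w.length), w[j]'hj ≠ c := by
  obtain ⟨hpre, hless⟩ := PySem.Chars.find_spec h
  refine ⟨(PySem.Chars.find w [c]).toNat, by omega, ?_, ?_⟩
  · rw [pv_single_prefix] at hpre
    obtain ⟨hk, hv⟩ := List.getElem?_eq_some_iff.mp hpre
    exact ⟨hk, hv⟩
  · intro j hj hjl hcj
    exact hless j hj ((pv_single_prefix w c j).mpr (by rw [List.getElem?_eq_some_iff]; exact ⟨hjl, hcj⟩))

-- the minimum of the per-character finds is the index of the first delimiter
lemma pv_min_hits (w : List Char) :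
    PySem.List.min? (((['.', '\n', '!', '?'] : List Char).map
        (fun c => PySem.Chars.find w [c])).filter (fun h => !(h == -1))) (fun x => x)
      = (w.findIdx? (['.', '\n', '!', '?'] : List Char).contains).map (fun i => (i : Int)) := by
  rcases hIdx : w.findIdx? (['.', '\n', '!', '?'] : List Char).contains with _ | i
  · have hnone := List.findIdx?_eq_none_iff.mp hIdx
    have hfil : (((['.', '\n', '!', '?'] : List Char).map
        (fun c => PySem.Chars.find w [c])).filter (fun h => !(h == -1))) = [] := by
      rw [List.filter_eq_nil_iff]
      intro x hx
      simp only [List.mem_map] at hx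
      obtain ⟨c, hc4, rfl⟩ := hx
      simp only [Bool.not_eq_true', beq_eq_false_iff_ne, ne_eq, Decidable.not_not]
      by_contra hne
      have hpos : 0 ≤ PySem.Chars.find w [c] := by
        have := PySem.Chars.neg_one_le_find w [c]
        omega
      have hmem : c ∈ w := (pv_single_infix w c).mp ((PySem.Chars.find_nonneg_iff w [c]).mp hpos)
      have := hnone c hmem
      simp only [List.contains_eq_mem, decide_eq_false_iff_not] at this
      exact this hc4
    rw [hfil]
    simp [PySem.List.min?_eq_none_iff]
  · obtain ⟨hi, hPi, hmin⟩ := List.findIdx?_eq_some_iff_getElem.mp hIdx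
    have hci : w[i] ∈ (['.', '\n', '!', '?'] : List Char) := by
      simpa [List.contains_eq_mem] using hPi
    have hpos : 0 ≤ PySem.Chars.find w [w[i]] :=
      (PySem.Chars.find_nonneg_iff w [w[i]]).mpr ((pv_single_infix w _).mpr (List.getElem_mem hi))
    obtain ⟨k, hkval, ⟨hk, hkc⟩, hkmin⟩ := pv_find_char_eq w w[i] hpos
    have hik : k = i := by
      rcases lt_trichotomy k i with h | h | h
      · exact absurd (hkc ▸ hPi) (hmin k h)
      · exact h
      · exact absurd rfl (hkmin i h hi)
    have hlow : ∀ x ∈ (((['.', '\n', '!', '?'] : List Char).map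
        (fun c => PySem.Chars.find w [c])).filter (fun h => !(h == -1))), (i : Int) ≤ x := by
      intro x hx
      rw [List.mem_filter] at hx
      obtain ⟨hxm, hxne⟩ := hx
      simp only [List.mem_map] at hxm
      obtain ⟨c, hc4, rfl⟩ := hxm
      simp only [Bool.not_eq_true', beq_eq_false_iff_ne, ne_eq] at hxne
      have hxpos : 0 ≤ PySem.Chars.find w [c] := by
        have := PySem.Chars.neg_one_le_find w [c]
        omega
      obtain ⟨k', hk'val, ⟨hk', hk'c⟩, _⟩ := pv_find_char_eq w c hxpos
      have : ¬ k' < i := by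
        intro hlt
        apply hmin k' hlt
        rw [hk'c]
        simp [List.contains_eq_mem, hc4]
      omega
    have hmemi : (i : Int) ∈ (((['.', '\n', '!', '?'] : List Char).map
        (fun c => PySem.Chars.find w [c])).filter (fun h => !(h == -1))) := by
      rw [List.mem_filter]
      constructor
      · simp only [List.mem_map]
        exact ⟨w[i], hci, by rw [hik] at hkval; exact hkval⟩
      · simp only [Bool.not_eq_true', beq_eq_false_iff_ne, ne_eq]
        omega
    rcases hm : PySem.List.min? (((['.', '\n', '!', '?'] : List Char).map
        (fun c => PySem.Chars.find w [c])).filter (fun h => !(h == -1))) (fun x => x) with _ | m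
    · rw [PySem.List.min?_eq_none_iff] at hm
      rw [hm] at hmemi
      simp at hmemi
    · have h1 : (i : Int) ≤ m := hlow m (PySem.List.min?_mem hm)
      have h2 : m ≤ (i : Int) := PySem.List.min?_isMin hm _ hmemi
      simp only [Option.map_some, Option.bind_eq_bind, Option.bind_some, Option.pure_def,
        Option.some.injEq]
      omega

-- ===== VERDICT (by name: the statement is the Claim_ definition above) =====
theorem extend_to_sentence_boundary_py_spec : Claim_equal_extend_to_sentence_boundary_py := by
  intro text start_pos end_pos max_extension _hdom hpre
  unfold Spec_extend_to_sentence_boundary_py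
  unfold Pre_extend_to_sentence_boundary_py at hpre
  unfold extend_to_sentence_boundary_py extend_to_sentence_boundary_py_alt
  dsimp only
  set cs := text.toList with hcs
  set l := min (start_pos + max_extension) ((cs.length : Int)) with hldef
  congr 1
  by_cases h : end_pos < l
  · have hpre' : (0:Int) ≤ end_pos := by
      rcases hpre with h0 | hle
      · exact h0
      · rw [hldef] at h; omega
    have h0l : (0:Int) ≤ l := by omega
    have hll : l ≤ (cs.length : Int) := min_le_right _ _
    rw [pv_scan_eq cs h0l hll ((l - end_pos).toNat) end_pos end_pos hpre' rfl, if_pos h,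
        pv_min_hits]
    rcases hf : (PySem.Chars.slice cs (some end_pos) (some l)).findIdx?
        (['.', '\n', '!', '?'] : List Char).contains with _ | i
    · rfl
    · have hsplit := congrArg List.length
        (List.takeWhile_append_dropWhile
          (p := ([' ', '\t'] : List Char).contains)
          (l := PySem.Chars.slice cs (some (end_pos + (i : Int) + 1)) (some l)))
      simp only [Option.map_some, Option.bind_eq_bind, Option.bind_some, Option.pure_def,
        Option.some.injEq]
      rw [List.length_append] at hsplit
      push_cast [← hsplit]
      ring
  · have hz : (l - end_pos).toNat = 0 := by omega
    rw [hz, if_neg h]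
    rfl
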